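-- pv_equiv track=rewrite | github.com/ivanmedina/CRO2Timetabling | timetabling/lib/funciones.py | encontrarUnosX
-- ===== SOURCE A (Python) =====
-- def encontrarUnosX(X):
--     coors0=[]
--     coors1=[]
--     for d in range(0,len(X)):
--         for e in range(0,len(X[d])):
--             for s in range(0,len(X[d][e])):
--                 for c in range(0,len(X[d][e][s])):
--                     for p in range(0,len(X[d][e][s][c])):
--                         if X[d][e][s][c][p]==1:
--                             coors1.append([d,e,s,c,p])
--                         else:
--                             coors0.append([d,e,s,c,p])
--
--     return [ coors0, coors1 ]
-- ===== SOURCE B (Python) =====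
-- def encontrarUnosX(X):
--     coors0 = []
--     coors1 = []
--
--     def walk(sub, prefix):
--         if len(prefix) == 5:
--             (coors1 if sub == 1 else coors0).append(prefix)
--         else:
--             for i in range(len(sub)):
--                 walk(sub[i], prefix + [i])
--
--     walk(X, [])
--     return [coors0, coors1]
-- ===== Notes on version B (the rewrite author's own statement) =====
-- stated objective: alternative
-- what changed: Replaces the five hard-coded nested index loops with a single depth-generic recursive walker that carries the coordinate prefix and dispatches on depth 5 to classify the leaf.
import Mathlib
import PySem

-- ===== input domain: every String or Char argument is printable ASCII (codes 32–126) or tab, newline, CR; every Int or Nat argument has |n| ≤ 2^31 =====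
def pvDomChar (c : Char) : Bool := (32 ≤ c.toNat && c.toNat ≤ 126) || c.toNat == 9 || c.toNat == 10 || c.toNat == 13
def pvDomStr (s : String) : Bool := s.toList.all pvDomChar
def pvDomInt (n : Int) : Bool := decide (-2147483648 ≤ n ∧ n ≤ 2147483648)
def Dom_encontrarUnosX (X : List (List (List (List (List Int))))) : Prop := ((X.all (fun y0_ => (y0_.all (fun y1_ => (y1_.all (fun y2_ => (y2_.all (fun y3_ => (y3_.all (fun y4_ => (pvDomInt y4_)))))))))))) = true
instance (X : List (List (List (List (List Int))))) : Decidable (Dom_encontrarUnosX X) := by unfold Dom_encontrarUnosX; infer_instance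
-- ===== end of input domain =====

-- B replaces A's five hard-coded nested index loops by one depth-generic recursive
-- walker carrying the coordinate prefix (same asymptotic cost; a different decomposition).


-- ===== PORT A =====
-- literal port of A's five nested 'for … in range(0, len(…))' loops over indices,
-- threading the pair (coors0, coors1); xs[i] with i drawn from range(len(xs)) is
-- PySem.List.pyGetD (the default is never reached since the index is in range)
def encontrarUnosX (X : List (List (List (List (List Int))))) : List (List (List Int)) :=
  let st :=
    (PySem.List.pyRange 0 (X.length : Int) 1).foldl (fun st d =>
      let Xd := PySem.List.pyGetD X d []
      (PySem.List.pyRange 0 (Xd.length : Int) 1).foldl (fun st e =>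
        let Xe := PySem.List.pyGetD Xd e []
        (PySem.List.pyRange 0 (Xe.length : Int) 1).foldl (fun st s =>
          let Xs := PySem.List.pyGetD Xe s []
          (PySem.List.pyRange 0 (Xs.length : Int) 1).foldl (fun st c =>
            let Xc := PySem.List.pyGetD Xs c []
            (PySem.List.pyRange 0 (Xc.length : Int) 1).foldl (fun st p =>
              if PySem.List.pyGetD Xc p 0 == 1 then
                (st.1, st.2 ++ [[d, e, s, c, p]])
              else
                (st.1 ++ [[d, e, s, c, p]], st.2)) st) st) st) st) (([], []) : List (List Int) × List (List Int))
  [st.1, st.2]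

-- ===== PORT B =====
-- port of Source B's walk: at depth 5 classify the leaf …
def pvLeaf (v : Int) (pre : List Int) (st : List (List Int) × List (List Int)) :
    List (List Int) × List (List Int) :=
  if v == 1 then (st.1, st.2 ++ [pre]) else (st.1 ++ [pre], st.2)

-- … and below depth 5 recurse into each child with prefix + [i] (the 'for i in range(len(sub))'
-- of walk, as structural recursion over sub with the index counter i)
def pvWalkStep {α : Type} (g : α → List Int → List (List Int) × List (List Int) → List (List Int) × List (List Int)) :
    List α → Int → List Int → List (List Int) × List (List Int) → List (List Int) × List (List Int)
  | [], _, _, st => st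
  | x :: rest, i, pre, st => pvWalkStep g rest (i + 1) pre (g x (pre ++ [i]) st)

def pvDescend {α : Type} (g : α → List Int → List (List Int) × List (List Int) → List (List Int) × List (List Int))
    (xs : List α) (pre : List Int) (st : List (List Int) × List (List Int)) :
    List (List Int) × List (List Int) :=
  pvWalkStep g xs 0 pre st

def encontrarUnosX_alt (X : List (List (List (List (List Int))))) : List (List (List Int)) :=
  let st := pvDescend (pvDescend (pvDescend (pvDescend (pvDescend pvLeaf)))) X [] ([], [])
  [st.1, st.2]

-- ===== PRECONDITION & SPEC =====
def Spec_encontrarUnosX (X : List (List (List (List (List Int))))) (out : List (List (List Int))) : Prop := out = encontrarUnosX_alt X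
instance (X : List (List (List (List (List Int))))) (out : List (List (List Int))) : Decidable (Spec_encontrarUnosX X out) := by unfold Spec_encontrarUnosX; infer_instance

-- ===== CLAIM (what is proved, stated in full; the proofs are below) =====
def Claim_equal_encontrarUnosX : Prop := ∀ (X : List (List (List (List (List Int))))), Dom_encontrarUnosX X → Spec_encontrarUnosX X (encontrarUnosX X)

-- ===== LEMMAS AND PROOFS =====

-- an index loop over range(len xs) that uses both the index j and xs[j] is the fold over enumerate xs
theorem pvConvertFold {α : Type} (xs : List α) (d : α)
    (F : List (List Int) × List (List Int) → Int → α → List (List Int) × List (List Int))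
    (st : List (List Int) × List (List Int)) :
    (PySem.List.pyRange 0 (xs.length : Int) 1).foldl (fun st j => F st j (PySem.List.pyGetD xs j d)) st
      = (PySem.List.enumerate xs 0).foldl (fun st jv => F st jv.1 jv.2) st := by
  rw [PySem.List.enumerate_eq_map_pyRange (d := d), List.foldl_map]
  simp [PySem.List.len_eq]

-- the fold over enumerate, applying g to each child with prefix ++ [index], is pvWalkStep
theorem pvStepLemma {α : Type}
    (g : α → List Int → List (List Int) × List (List Int) → List (List Int) × List (List Int)) :
    ∀ (xs : List α) (i : Int) (pre : List Int) (st : List (List Int) × List (List Int)),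
      (PySem.List.enumerate xs i).foldl (fun st jv => g jv.2 (pre ++ [jv.1]) st) st
        = pvWalkStep g xs i pre st := by
  intro xs
  induction xs with
  | nil => intro i pre st; simp [PySem.List.enumerate_nil, pvWalkStep]
  | cons x rest ih =>
      intro i pre st
      rw [PySem.List.enumerate_cons, List.foldl_cons, pvWalkStep, ih]

-- lifting: if the A-side body for one element equals g, the A-side index loop equals pvDescend g
theorem pvLiftLevel {α : Type} (d : α)
    (g A : α → List Int → List (List Int) × List (List Int) → List (List Int) × List (List Int))
    (h : ∀ v pre st, A v pre st = g v pre st) :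
    ∀ (xs : List α) (pre : List Int) (st : List (List Int) × List (List Int)),
      (PySem.List.pyRange 0 (xs.length : Int) 1).foldl
          (fun st j => A (PySem.List.pyGetD xs j d) (pre ++ [j]) st) st
        = pvDescend g xs pre st := by
  intro xs pre st
  calc (PySem.List.pyRange 0 (xs.length : Int) 1).foldl
          (fun st j => A (PySem.List.pyGetD xs j d) (pre ++ [j]) st) st
      = (PySem.List.enumerate xs 0).foldl (fun st jv => A jv.2 (pre ++ [jv.1]) st) st :=
        pvConvertFold xs d (fun st j v => A v (pre ++ [j]) st) st
    _ = (PySem.List.enumerate xs 0).foldl (fun st jv => g jv.2 (pre ++ [jv.1]) st) st :=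
        by exact PySem.List.foldl_congr_mem _ _ _ _ fun st (jv : Int × α) _ => h jv.2 (pre ++ [jv.1]) st
    _ = pvDescend g xs pre st := pvStepLemma g xs 0 pre st

theorem pvLvl1 (xs : List Int) (pre : List Int) (st : List (List Int) × List (List Int)) :
    (PySem.List.pyRange 0 (xs.length : Int) 1).foldl (fun st p =>
        if PySem.List.pyGetD xs p 0 == 1 then (st.1, st.2 ++ [pre ++ [p]])
        else (st.1 ++ [pre ++ [p]], st.2)) st
      = pvDescend pvLeaf xs pre st :=
  pvLiftLevel 0 pvLeaf pvLeaf (fun _ _ _ => rfl) xs pre st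

theorem pvLvl2 (xs : List (List Int)) (pre : List Int) (st : List (List Int) × List (List Int)) :
    (PySem.List.pyRange 0 (xs.length : Int) 1).foldl (fun st c =>
        (PySem.List.pyRange 0 ((PySem.List.pyGetD xs c []).length : Int) 1).foldl (fun st p =>
          if PySem.List.pyGetD (PySem.List.pyGetD xs c []) p 0 == 1 then
            (st.1, st.2 ++ [(pre ++ [c]) ++ [p]])
          else (st.1 ++ [(pre ++ [c]) ++ [p]], st.2)) st) st
      = pvDescend (pvDescend pvLeaf) xs pre st :=
  pvLiftLevel [] (pvDescend pvLeaf) _ (fun v pre st => pvLvl1 v pre st) xs pre st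

theorem pvLvl3 (xs : List (List (List Int))) (pre : List Int) (st : List (List Int) × List (List Int)) :
    (PySem.List.pyRange 0 (xs.length : Int) 1).foldl (fun st s =>
        (PySem.List.pyRange 0 ((PySem.List.pyGetD xs s []).length : Int) 1).foldl (fun st c =>
          (PySem.List.pyRange 0 ((PySem.List.pyGetD (PySem.List.pyGetD xs s []) c []).length : Int) 1).foldl (fun st p =>
            if PySem.List.pyGetD (PySem.List.pyGetD (PySem.List.pyGetD xs s []) c []) p 0 == 1 then
              (st.1, st.2 ++ [((pre ++ [s]) ++ [c]) ++ [p]])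
            else (st.1 ++ [((pre ++ [s]) ++ [c]) ++ [p]], st.2)) st) st) st
      = pvDescend (pvDescend (pvDescend pvLeaf)) xs pre st :=
  pvLiftLevel [] (pvDescend (pvDescend pvLeaf)) _ (fun v pre st => pvLvl2 v pre st) xs pre st

theorem pvLvl4 (xs : List (List (List (List Int)))) (pre : List Int) (st : List (List Int) × List (List Int)) :
    (PySem.List.pyRange 0 (xs.length : Int) 1).foldl (fun st e =>
        (PySem.List.pyRange 0 ((PySem.List.pyGetD xs e []).length : Int) 1).foldl (fun st s =>
          (PySem.List.pyRange 0 ((PySem.List.pyGetD (PySem.List.pyGetD xs e []) s []).length : Int) 1).foldl (fun st c =>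
            (PySem.List.pyRange 0 ((PySem.List.pyGetD (PySem.List.pyGetD (PySem.List.pyGetD xs e []) s []) c []).length : Int) 1).foldl (fun st p =>
              if PySem.List.pyGetD (PySem.List.pyGetD (PySem.List.pyGetD (PySem.List.pyGetD xs e []) s []) c []) p 0 == 1 then
                (st.1, st.2 ++ [(((pre ++ [e]) ++ [s]) ++ [c]) ++ [p]])
              else (st.1 ++ [(((pre ++ [e]) ++ [s]) ++ [c]) ++ [p]], st.2)) st) st) st) st
      = pvDescend (pvDescend (pvDescend (pvDescend pvLeaf))) xs pre st :=
  pvLiftLevel [] (pvDescend (pvDescend (pvDescend pvLeaf))) _ (fun v pre st => pvLvl3 v pre st) xs pre st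

theorem pvLvl5 (xs : List (List (List (List (List Int))))) (pre : List Int) (st : List (List Int) × List (List Int)) :
    (PySem.List.pyRange 0 (xs.length : Int) 1).foldl (fun st d =>
        (PySem.List.pyRange 0 ((PySem.List.pyGetD xs d []).length : Int) 1).foldl (fun st e =>
          (PySem.List.pyRange 0 ((PySem.List.pyGetD (PySem.List.pyGetD xs d []) e []).length : Int) 1).foldl (fun st s =>
            (PySem.List.pyRange 0 ((PySem.List.pyGetD (PySem.List.pyGetD (PySem.List.pyGetD xs d []) e []) s []).length : Int) 1).foldl (fun st c =>
              (PySem.List.pyRange 0 ((PySem.List.pyGetD (PySem.List.pyGetD (PySem.List.pyGetD (PySem.List.pyGetD xs d []) e []) s []) c []).length : Int) 1).foldl (fun st p =>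
                if PySem.List.pyGetD (PySem.List.pyGetD (PySem.List.pyGetD (PySem.List.pyGetD (PySem.List.pyGetD xs d []) e []) s []) c []) p 0 == 1 then
                  (st.1, st.2 ++ [((((pre ++ [d]) ++ [e]) ++ [s]) ++ [c]) ++ [p]])
                else (st.1 ++ [((((pre ++ [d]) ++ [e]) ++ [s]) ++ [c]) ++ [p]], st.2)) st) st) st) st) st
      = pvDescend (pvDescend (pvDescend (pvDescend (pvDescend pvLeaf)))) xs pre st :=
  pvLiftLevel [] (pvDescend (pvDescend (pvDescend (pvDescend pvLeaf)))) _ (fun v pre st => pvLvl4 v pre st) xs pre st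

-- ===== VERDICT (by name: the statement is the Claim_ definition above) =====
theorem encontrarUnosX_spec : Claim_equal_encontrarUnosX := by
  intro X _
  show encontrarUnosX X = encontrarUnosX_alt X
  exact congrArg (fun st => [st.1, st.2]) (pvLvl5 X [] ([], []))
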